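-- pv_equiv track=rewrite | github.com/langrenn-sprint/integration-service | integration_service/adapters/foto_sync_service.py | group_photos
-- ===== SOURCE A (Python) =====
-- def group_photos(photo_list: list[str]) -> dict[str, dict[str, str]]:
--     """Create a dictionary where the photos are grouped by main and crop."""
--     photo_dict = {}
--     for photo_name in photo_list:
--         if "_crop" in photo_name:
--             main_photo = photo_name.replace("_crop", "")
--             if main_photo not in photo_dict:
--                 photo_dict[main_photo] = {"main": "", "crop": photo_name}
--             else:
--                 photo_dict[main_photo] = {"main": main_photo, "crop": photo_name}
--         elif photo_name not in photo_dict: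
--             photo_dict[photo_name] = {"main": photo_name, "crop": ""}
--         else:
--             photo_dict[photo_name] = {
--                 "main": photo_name,
--                 "crop": photo_dict[photo_name]["crop"],
--             }
--     return photo_dict
-- ===== SOURCE B (Python) =====
-- def _reduce_crop(entries):
--     crop = ""
--     for name, is_crop in entries:
--         if is_crop:
--             crop = name
--     return crop
--
--
-- def _reduce_main(key, entries):
--     return "" if len(entries) == 1 and entries[0][1] else key
--
--
-- def group_photos(photo_list: list[str]) -> dict[str, dict[str, str]]:
--     """Group-then-reduce: collect (photo, is_crop) entries per main key, then build each row."""
--     groups: dict[str, list[tuple[str, bool]]] = {}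
--     for photo in photo_list:
--         is_crop = "_crop" in photo
--         key = photo.replace("_crop", "") if is_crop else photo
--         groups[key] = groups.get(key, []) + [(photo, is_crop)]
--     return {
--         key: {"main": _reduce_main(key, entries), "crop": _reduce_crop(entries)}
--         for key, entries in groups.items()
--     }
-- ===== Notes on version B (the rewrite author's own statement) =====
-- stated objective: alternative
-- what changed: Replaces A's incremental last-write-wins dict state machine with a two-pass group-then-reduce: one pass collects (photo, is_crop) entries per main key in first-seen order, a second pass reduces each group (last crop wins; main is empty only for a lone single crop).
import Mathlib
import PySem

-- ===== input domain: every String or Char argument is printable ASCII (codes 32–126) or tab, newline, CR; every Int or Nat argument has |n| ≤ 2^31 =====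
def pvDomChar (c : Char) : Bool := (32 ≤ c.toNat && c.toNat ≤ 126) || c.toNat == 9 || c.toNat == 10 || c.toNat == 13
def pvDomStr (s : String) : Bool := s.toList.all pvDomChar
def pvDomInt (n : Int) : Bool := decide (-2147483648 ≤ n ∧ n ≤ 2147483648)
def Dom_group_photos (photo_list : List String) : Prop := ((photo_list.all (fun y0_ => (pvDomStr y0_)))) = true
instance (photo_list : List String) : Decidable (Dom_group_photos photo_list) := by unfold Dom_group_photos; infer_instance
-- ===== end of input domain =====

-- B replaces A's incremental last-write-wins state machine by a group-then-reduce two-pass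
-- decomposition (same cost, different structure). Return-value equivalence only; neither mutates.

-- ===== PORT A =====
def group_photos (photo_list : List String) : List (String × List (String × String)) :=
  (photo_list.foldl (fun photo_dict photo_name =>
      if PySem.Str.isIn "_crop" photo_name then
        let main_photo := PySem.Str.replace photo_name "_crop" ""
        if photo_dict.contains main_photo = false then
          photo_dict.insert main_photo [("main", ""), ("crop", photo_name)]
        else
          photo_dict.insert main_photo [("main", main_photo), ("crop", photo_name)]
      else if photo_dict.contains photo_name = false then
        photo_dict.insert photo_name [("main", photo_name), ("crop", "")]
      else
        -- photo_dict[photo_name]["crop"]: both lookups always succeed here (every stored row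
        -- has a "crop" key), so the getD defaults are never taken
        photo_dict.insert photo_name [("main", photo_name),
          ("crop", (PySem.Dict.mk ((photo_dict.get? photo_name).getD [])).getD "crop" "")])
    PySem.Dict.empty).items

-- ===== PORT B =====
-- helper _reduce_crop of Source B
def pvReduceCrop (entries : List (String × Bool)) : String :=
  entries.foldl (fun crop p => if p.2 then p.1 else crop) ""

-- helper _reduce_main of Source B
def pvReduceMain (key : String) (entries : List (String × Bool)) : String :=
  if entries.length == 1 && (entries.headD ("", false)).2 then "" else key

def group_photos_alt (photo_list : List String) : List (String × List (String × String)) :=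
  let groups := photo_list.foldl (fun g photo =>
      let is_crop := PySem.Str.isIn "_crop" photo
      let key := if is_crop then PySem.Str.replace photo "_crop" "" else photo
      g.insert key (g.getD key [] ++ [(photo, is_crop)]))
    PySem.Dict.empty
  (groups.items.foldl (fun r p =>
      r.insert p.1 [("main", pvReduceMain p.1 p.2), ("crop", pvReduceCrop p.2)])
    PySem.Dict.empty).items

-- ===== PRECONDITION & SPEC =====
def Spec_group_photos (photo_list : List String) (out : List (String × List (String × String))) : Prop := out = group_photos_alt photo_list
instance (photo_list : List String) (out : List (String × List (String × String))) : Decidable (Spec_group_photos photo_list out) := by unfold Spec_group_photos; infer_instance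

-- ===== CLAIM (what is proved, stated in full; the proofs are below) =====
def Claim_equal_group_photos : Prop := ∀ (photo_list : List String), Dom_group_photos photo_list → Spec_group_photos photo_list (group_photos photo_list)

-- ===== LEMMAS AND PROOFS =====

-- the reduction of one group: what B's second pass produces for one entry of `groups`
def pvEntry (p : String × List (String × Bool)) : String × List (String × String) :=
  (p.1, [("main", pvReduceMain p.1 p.2), ("crop", pvReduceCrop p.2)])

-- A's loop body, named (identical term to the lambda in group_photos)
def pvStepA (photo_dict : PySem.Dict String (List (String × String))) (photo_name : String) :
    PySem.Dict String (List (String × String)) :=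
  if PySem.Str.isIn "_crop" photo_name then
    let main_photo := PySem.Str.replace photo_name "_crop" ""
    if photo_dict.contains main_photo = false then
      photo_dict.insert main_photo [("main", ""), ("crop", photo_name)]
    else
      photo_dict.insert main_photo [("main", main_photo), ("crop", photo_name)]
  else if photo_dict.contains photo_name = false then
    photo_dict.insert photo_name [("main", photo_name), ("crop", "")]
  else
    photo_dict.insert photo_name [("main", photo_name),
      ("crop", (PySem.Dict.mk ((photo_dict.get? photo_name).getD [])).getD "crop" "")]

-- B's grouping-loop body, named
def pvStepB (g : PySem.Dict String (List (String × Bool))) (photo : String) :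
    PySem.Dict String (List (String × Bool)) :=
  let is_crop := PySem.Str.isIn "_crop" photo
  let key := if is_crop then PySem.Str.replace photo "_crop" "" else photo
  g.insert key (g.getD key [] ++ [(photo, is_crop)])

-- the loop invariant relating A's dict to B's groups dict
def pvInv (d : PySem.Dict String (List (String × String)))
    (g : PySem.Dict String (List (String × Bool))) : Prop :=
  d.items = g.items.map pvEntry ∧ g.keys.Nodup ∧ ∀ p ∈ g.items, p.2 ≠ []

lemma pvKeys_eq {d : PySem.Dict String (List (String × String))}
    {g : PySem.Dict String (List (String × Bool))}
    (h : d.items = g.items.map pvEntry) : d.keys = g.keys := by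
  simp only [PySem.Dict.keys, h, List.map_map]
  rfl

lemma pvContains_eq {d : PySem.Dict String (List (String × String))}
    {g : PySem.Dict String (List (String × Bool))}
    (h : d.items = g.items.map pvEntry) (k : String) : d.contains k = g.contains k := by
  simp [PySem.Dict.contains_eq_decide_mem_keys, pvKeys_eq h]

lemma pvExists_entry {g : PySem.Dict String (List (String × Bool))} {k : String}
    (hc : g.contains k = true) : ∃ es, (k, es) ∈ g.items := by
  rw [PySem.Dict.contains_iff_mem_keys] at hc
  simp only [PySem.Dict.keys, List.mem_map] at hc
  obtain ⟨p, hp, hk⟩ := hc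
  exact ⟨p.2, by simpa [← hk] using hp⟩

lemma pvEntry_append_ne_nil {k x : String} {b : Bool} {es : List (String × Bool)}
    (hes : es ≠ []) :
    pvEntry (k, es ++ [(x, b)]) =
      (k, [("main", k), ("crop", if b then x else pvReduceCrop es)]) := by
  have h1 : ((es ++ [(x, b)]).length == 1) = false := by
    cases es with
    | nil => exact absurd rfl hes
    | cons a l => simp
  simp only [pvEntry, pvReduceMain, pvReduceCrop, List.foldl_append, List.foldl_cons,
    List.foldl_nil, h1, Bool.false_and, Bool.false_eq_true, if_false]

lemma pvInv_insert_fresh (d : PySem.Dict String (List (String × String)))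
    (g : PySem.Dict String (List (String × Bool))) (k : String) (q : String × Bool)
    (vA : List (String × String)) (h : pvInv d g) (hc : g.contains k = false)
    (hv : pvEntry (k, [q]) = (k, vA)) :
    pvInv (d.insert k vA) (g.insert k (g.getD k [] ++ [q])) := by
  obtain ⟨hit, hnd, hne⟩ := h
  have hcd : d.contains k = false := (pvContains_eq hit k).trans hc
  have hgd : g.getD k [] = [] := PySem.Dict.getD_of_not_contains g [] hc
  refine ⟨?_, ?_, ?_⟩
  · rw [PySem.Dict.items_insert_of_not_contains d vA hcd,
      PySem.Dict.items_insert_of_not_contains g _ hc, hgd]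
    simp [hit, ← hv]
  · rw [PySem.Dict.keys_insert_of_not_contains g _ hc]
    have hk : ∀ a ∈ g.keys, ¬a = k := by
      intro a ha h
      rw [h, ← PySem.Dict.contains_iff_mem_keys] at ha
      simp [ha] at hc
    simp [List.nodup_append, hnd]
    exact hk
  · intro p hp
    rw [PySem.Dict.items_insert_of_not_contains g _ hc, hgd] at hp
    rcases List.mem_append.mp hp with h' | h'
    · exact hne p h'
    · simp_all

lemma pvInv_insert_contained (d : PySem.Dict String (List (String × String)))
    (g : PySem.Dict String (List (String × Bool))) (k : String) (q : String × Bool)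
    (vA : List (String × String)) (h : pvInv d g) (hc : g.contains k = true)
    (hv : ∀ es, es ≠ [] → (k, es) ∈ g.items → pvEntry (k, es ++ [q]) = (k, vA)) :
    pvInv (d.insert k vA) (g.insert k (g.getD k [] ++ [q])) := by
  obtain ⟨hit, hnd, hne⟩ := h
  have hcd : d.contains k = true := (pvContains_eq hit k).trans hc
  obtain ⟨es, hmem⟩ := pvExists_entry hc
  have hesne : es ≠ [] := hne (k, es) hmem
  have hgd : g.getD k [] = es := PySem.Dict.getD_of_mem_items g hmem hnd []
  have hvA : pvEntry (k, es ++ [q]) = (k, vA) := hv es hesne hmem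
  refine ⟨?_, ?_, ?_⟩
  · rw [PySem.Dict.items_insert_of_contains d vA hcd,
      PySem.Dict.items_insert_of_contains g _ hc, hgd, hit, List.map_map, List.map_map]
    refine List.map_congr_left (fun p hp => ?_)
    by_cases hpk : p.1 = k
    · simp only [Function.comp_apply, pvEntry, hpk, beq_self_eq_true, if_true]
      simpa [pvEntry, Prod.ext_iff] using hvA.symm
    · simp [Function.comp, pvEntry, hpk]
  · rw [PySem.Dict.keys_insert_of_contains g _ hc]; exact hnd
  · intro p hp
    rw [PySem.Dict.items_insert_of_contains g _ hc, hgd] at hp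
    obtain ⟨p', hp', heq⟩ := List.mem_map.mp hp
    by_cases hpk : p'.1 = k
    · subst heq
      simp only [hpk, beq_self_eq_true, if_true]
      exact fun hcontr => hesne (List.append_eq_nil_iff.mp hcontr).1
    · subst heq
      have hb : (p'.1 == k) = false := by simp [hpk]
      simp only [hb, Bool.false_eq_true, if_false]
      exact hne p' hp'

lemma pvStep_inv (d : PySem.Dict String (List (String × String)))
    (g : PySem.Dict String (List (String × Bool))) (x : String)
    (h : pvInv d g) : pvInv (pvStepA d x) (pvStepB g x) := by
  obtain ⟨hit, hnd, hne⟩ := h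
  unfold pvStepA pvStepB
  by_cases hb : PySem.Str.isIn "_crop" x = true
  · simp only [hb, if_true]
    set k := PySem.Str.replace x "_crop" "" with hk
    by_cases hc : g.contains k = true
    · rw [pvContains_eq hit k, hc]
      simp only [Bool.true_eq_false, if_false]
      exact pvInv_insert_contained d g k (x, true) _ ⟨hit, hnd, hne⟩ hc
        (fun es hes _ => by rw [pvEntry_append_ne_nil hes]; simp)
    · replace hc : g.contains k = false := by simpa using hc
      rw [pvContains_eq hit k, hc]
      simp only [if_true]
      exact pvInv_insert_fresh d g k (x, true) _ ⟨hit, hnd, hne⟩ hc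
        (by simp [pvEntry, pvReduceMain, pvReduceCrop])
  · replace hb : PySem.Str.isIn "_crop" x = false := by simpa using hb
    simp only [hb, Bool.false_eq_true, if_false]
    by_cases hc : g.contains x = true
    · rw [pvContains_eq hit x, hc]
      simp only [Bool.true_eq_false, if_false]
      refine pvInv_insert_contained d g x (x, false) _ ⟨hit, hnd, hne⟩ hc
        (fun es hes hmem => ?_)
      have hdmem : pvEntry (x, es) ∈ d.items := by rw [hit]; exact List.mem_map_of_mem hmem
      have hdget : d.get? x = some [("main", pvReduceMain x es), ("crop", pvReduceCrop es)] :=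
        PySem.Dict.get?_of_mem_items d hdmem (by rw [pvKeys_eq hit]; exact hnd)
      rw [pvEntry_append_ne_nil hes, hdget]
      simp [PySem.Dict.getD_eq_get?_getD, PySem.Dict.get?_mk_cons]
    · replace hc : g.contains x = false := by simpa using hc
      rw [pvContains_eq hit x, hc]
      simp only [if_true]
      exact pvInv_insert_fresh d g x (x, false) _ ⟨hit, hnd, hne⟩ hc
        (by simp [pvEntry, pvReduceMain, pvReduceCrop])


lemma pvFold_inv (l : List String) (d : PySem.Dict String (List (String × String)))
    (g : PySem.Dict String (List (String × Bool))) (h : pvInv d g) :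
    pvInv (l.foldl pvStepA d) (l.foldl pvStepB g) := by
  induction l generalizing d g with
  | nil => exact h
  | cons x xs ih => exact ih _ _ (pvStep_inv d g x h)

-- ===== VERDICT (by name: the statement is the Claim_ definition above) =====
theorem group_photos_spec : Claim_equal_group_photos := by
  intro photo_list _
  unfold Spec_group_photos
  have hinv : pvInv (photo_list.foldl pvStepA PySem.Dict.empty)
      (photo_list.foldl pvStepB PySem.Dict.empty) := by
    apply pvFold_inv
    refine ⟨rfl, ?_, by simp [PySem.Dict.empty]⟩
    exact PySem.Dict.nodup_keys_empty
  obtain ⟨hitems, hnodup, -⟩ := hinv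
  have hA : group_photos photo_list = (photo_list.foldl pvStepA PySem.Dict.empty).items := rfl
  have hB : group_photos_alt photo_list =
      ((photo_list.foldl pvStepB PySem.Dict.empty).items.foldl
        (fun r p => r.insert p.1 [("main", pvReduceMain p.1 p.2), ("crop", pvReduceCrop p.2)])
        PySem.Dict.empty).items := rfl
  rw [hA, hB, hitems,
    PySem.Dict.items_foldl_insert_fresh _ Prod.fst
      (fun p => [("main", pvReduceMain p.1 p.2), ("crop", pvReduceCrop p.2)])
      PySem.Dict.empty (fun a _ => PySem.Dict.contains_empty _)
      (by simpa [PySem.Dict.keys] using hnodup)]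
  simp [PySem.Dict.empty, pvEntry]
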